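-- pv_equiv track=rewrite | github.com/svend4/meta | projects/hexlearn/hexlearn.py | centroid_hex
-- ===== SOURCE A (Python) =====
-- def centroid_hex(points: list[int]) -> int:
--     """
--     Гексаграмма, ближайшая к «центроиду» набора (минимизирует суммарное расстояние).
--     Эквивалентно медоиду; в Q6 по каждому биту берём большинство.
--     """
--     if not points:
--         raise ValueError("Пустое множество")
--     k = len(points)
--     result = 0
--     for bit in range(6):
--         count_one = sum(1 for p in points if (p >> bit) & 1)
--         if count_one > k // 2:
--             result |= (1 << bit)
--     return result
-- ===== SOURCE B (Python) =====
-- def centroid_hex(points: list[int]) -> int: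
--     """Exhaustive medoid search: score every candidate hexagram v in 0..63 by its
--     total Hamming distance to the set and return the first minimizer."""
--     if not points:
--         raise ValueError("Пустое множество")
--     best_v = 0
--     best_cost = None
--     for v in range(64):
--         cost = sum(((p ^ v) & 63).bit_count() for p in points)
--         if best_cost is None or cost < best_cost:
--             best_v, best_cost = v, cost
--     return best_v
-- ===== Notes on version B (the rewrite author's own statement) =====
-- stated objective: alternative
-- what changed: Replaces per-bit majority voting (six count-and-threshold scans) by an exhaustive medoid search: every candidate hexagram 0..63 is scored by its total Hamming distance (xor + popcount) to the set and the first minimizer is returned, which is what the docstring describes.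
import Mathlib
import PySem

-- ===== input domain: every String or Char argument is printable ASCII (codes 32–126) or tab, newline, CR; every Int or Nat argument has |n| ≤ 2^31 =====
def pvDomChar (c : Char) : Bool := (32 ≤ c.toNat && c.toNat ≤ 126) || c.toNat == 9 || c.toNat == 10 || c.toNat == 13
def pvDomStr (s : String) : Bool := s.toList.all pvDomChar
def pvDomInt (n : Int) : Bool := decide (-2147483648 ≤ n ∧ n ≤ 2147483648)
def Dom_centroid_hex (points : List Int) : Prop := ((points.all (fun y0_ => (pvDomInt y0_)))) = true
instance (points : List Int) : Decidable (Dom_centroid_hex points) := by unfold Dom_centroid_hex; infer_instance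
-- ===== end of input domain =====

-- B replaces A's per-bit majority vote by a different algorithm: an exhaustive
-- medoid search scoring all 64 candidate hexagrams by total Hamming distance
-- (xor + popcount) and returning the first minimizer (objective: alternative).

-- ===== PORT A =====
def centroid_hex (points : List Int) : Int :=
  let k : Int := points.length
  (List.range 6).foldl (fun (result : Int) (bit : Nat) =>
    let count_one : Int :=
      points.foldl (fun (acc : Int) (p : Int) => if PySem.Int.band (p >>> bit) 1 ≠ 0 then acc + 1 else acc) 0
    if count_one > PySem.Int.floordiv k 2 then PySem.Int.bor result (1 <<< bit) else result) 0

-- ===== PORT B =====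
def centroid_hex_alt (points : List Int) : Int :=
  ((List.range 64).foldl (fun (st : Int × Option Int) (v : Nat) =>
      let cost : Int := points.foldl (fun (acc : Int) (p : Int) =>
        acc + (PySem.Int.bitCount (PySem.Int.band (PySem.Int.bxor p (v : Int)) 63) : Int)) 0
      match st.2 with
      | none => ((v : Int), some cost)
      | some bc => if cost < bc then ((v : Int), some cost) else st)
    ((0 : Int), (none : Option Int))).1

-- ===== PRECONDITION & SPEC =====
-- Pre_ excludes exactly the empty list, on which both Pythons raise ValueError.
def Pre_centroid_hex (points : List Int) : Prop := points ≠ []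
instance (points : List Int) : Decidable (Pre_centroid_hex points) := by unfold Pre_centroid_hex; infer_instance
def pvWitness_centroid_hex : List Int := [5, 63, 0]
def Spec_centroid_hex (points : List Int) (out : Int) : Prop := out = centroid_hex_alt points
instance (points : List Int) (out : Int) : Decidable (Spec_centroid_hex points out) := by unfold Spec_centroid_hex; infer_instance

-- ===== CLAIM (what is proved, stated in full; the proofs are below) =====
def Claim_equal_centroid_hex : Prop := ∀ (points : List Int), Dom_centroid_hex points → Pre_centroid_hex points → Spec_centroid_hex points (centroid_hex points)

-- ===== LEMMAS AND PROOFS =====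

-- the low 6 bits of p, as a Nat (= p & 63 in Python)
def pvLow (p : Int) : Nat := (PySem.Int.band p 63).toNat
-- bit b of the residue r, as an Int in {0,1}
def pvBit (r b : Nat) : Int := (((r >>> b) &&& 1 : Nat) : Int)
-- number of points having bit b set  (A's count_one)
def pvC (points : List Int) (b : Nat) : Int := (points.map (fun p => pvBit (pvLow p) b)).sum
-- Hamming distance between residues v and r on the low 6 bits (B's per-point cost)
def pvG (v r : Nat) : Int := (PySem.Int.bitCount (((r ^^^ v) &&& 63 : Nat) : Int) : Int)
-- per-bit contribution of candidate v at a point with residue r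
def pvT (v b r : Nat) : Int := if v.testBit b then 1 - pvBit r b else pvBit r b
-- B's cost of candidate v, expressed through the six bit counts
def pvScore (points : List Int) (v : Nat) : Int :=
  (if v.testBit 0 then (points.length : Int) - pvC points 0 else pvC points 0) +
  (if v.testBit 1 then (points.length : Int) - pvC points 1 else pvC points 1) +
  (if v.testBit 2 then (points.length : Int) - pvC points 2 else pvC points 2) +
  (if v.testBit 3 then (points.length : Int) - pvC points 3 else pvC points 3) +
  (if v.testBit 4 then (points.length : Int) - pvC points 4 else pvC points 4) +
  (if v.testBit 5 then (points.length : Int) - pvC points 5 else pvC points 5)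
-- A's per-bit decision and A's result as a Nat
def pvD (points : List Int) (b : Nat) : Bool := decide ((points.length : Int) < pvC points b * 2)
def pvW (points : List Int) : Nat :=
  (if pvD points 0 then 1 else 0) + (if pvD points 1 then 2 else 0) +
  (if pvD points 2 then 4 else 0) + (if pvD points 3 then 8 else 0) +
  (if pvD points 4 then 16 else 0) + (if pvD points 5 then 32 else 0)
-- B's cost expression, exactly as in the port
def pvCost (points : List Int) (v : Nat) : Int :=
  points.foldl (fun (acc : Int) (p : Int) =>
    acc + (PySem.Int.bitCount (PySem.Int.band (PySem.Int.bxor p (v : Int)) 63) : Int)) 0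

theorem tb63 (i : Nat) : (63 : Nat).testBit i = decide (i < 6) := by
  simpa using Nat.testBit_two_pow_sub_one 6 i

theorem U (y b : Nat) : (y >>> b) &&& 1 = if y.testBit b then 1 else 0 := by
  rw [Nat.shiftRight_eq_div_pow, Nat.and_one_is_mod, Nat.testBit_eq_decide_div_mod_eq]
  rcases Nat.mod_two_eq_zero_or_one (y / 2 ^ b) with h | h <;> simp [h]

theorem T : ∀ t < 64, 63 - t = t ^^^ 63 := by decide

theorem N1 (x v : Nat) : (x ^^^ v) &&& 63 = ((x &&& 63) ^^^ v) &&& 63 := by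
  apply Nat.eq_of_testBit_eq; intro i
  simp [Nat.testBit_and, Nat.testBit_xor, tb63]
  by_cases h : i < 6 <;> simp [h]

theorem N2 (m v : Nat) : 63 - (63 &&& (m ^^^ v)) = ((63 - (63 &&& m)) ^^^ v) &&& 63 := by
  rw [T _ (by have : 63 &&& (m ^^^ v) ≤ 63 := Nat.and_le_left; omega),
      T _ (by have : 63 &&& m ≤ 63 := Nat.and_le_left; omega)]
  apply Nat.eq_of_testBit_eq; intro i
  simp [Nat.testBit_and, Nat.testBit_xor, tb63]
  by_cases h : i < 6 <;> simp [h]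

theorem negSucc_neg (m : Nat) : ¬ (0 ≤ Int.negSucc m) := by
  simp [Int.negSucc_eq]; omega

theorem negSucc_inner (m : Nat) : (-Int.negSucc m - 1).toNat = m := by
  have h : -Int.negSucc m - 1 = (m : Int) := by simp [Int.negSucc_eq]
  rw [h, Int.toNat_natCast]

theorem bandNegNat (m y : Nat) : PySem.Int.band (Int.negSucc m) (y : Int) = ((y - (y &&& m) : Nat) : Int) := by
  unfold PySem.Int.band
  rw [if_neg (negSucc_neg m), if_pos (Int.natCast_nonneg y), negSucc_inner, Int.toNat_natCast]

theorem bxorNegNat (m y : Nat) : PySem.Int.bxor (Int.negSucc m) (y : Int) = Int.negSucc (m ^^^ y) := by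
  unfold PySem.Int.bxor
  rw [if_neg (negSucc_neg m), if_pos (Int.natCast_nonneg y), negSucc_inner, Int.toNat_natCast]
  simp [Int.negSucc_eq]; omega

theorem pvLow_natCast (x : Nat) : pvLow (x : Int) = x &&& 63 := by
  unfold pvLow
  rw [show (63 : Int) = ((63 : Nat) : Int) from rfl, PySem.Int.band_natCast, Int.toNat_natCast]

theorem pvLow_negSucc (m : Nat) : pvLow (Int.negSucc m) = 63 - (63 &&& m) := by
  unfold pvLow
  rw [show (63 : Int) = ((63 : Nat) : Int) from rfl, bandNegNat, Int.toNat_natCast]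

theorem pvLow_lt (p : Int) : pvLow p < 64 := by
  cases p with
  | ofNat x =>
      rw [show Int.ofNat x = (x : Int) from rfl, pvLow_natCast]
      have : x &&& 63 ≤ 63 := Nat.and_le_right; omega
  | negSucc m => rw [pvLow_negSucc]; omega

theorem ML1 (p : Int) (v : Nat) :
    PySem.Int.band (PySem.Int.bxor p (v : Int)) 63 = (((pvLow p ^^^ v) &&& 63 : Nat) : Int) := by
  cases p with
  | ofNat x =>
      rw [show Int.ofNat x = (x : Int) from rfl, pvLow_natCast,
          PySem.Int.bxor_of_nonneg (Int.natCast_nonneg x) (Int.natCast_nonneg v),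
          Int.toNat_natCast, Int.toNat_natCast,
          show (63 : Int) = ((63 : Nat) : Int) from rfl, PySem.Int.band_natCast, N1]
  | negSucc m =>
      rw [pvLow_negSucc, bxorNegNat,
          show (63 : Int) = ((63 : Nat) : Int) from rfl, bandNegNat, N2]

theorem ML2 (p : Int) (b : Nat) (hb : b < 6) :
    PySem.Int.band (p >>> b) 1 = pvBit (pvLow p) b := by
  cases p with
  | ofNat x =>
      rw [show Int.ofNat x = (x : Int) from rfl, pvLow_natCast,
          show (x : Int) >>> b = ((x >>> b : Nat) : Int) from rfl,
          show (1 : Int) = ((1 : Nat) : Int) from rfl, PySem.Int.band_natCast]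
      unfold pvBit
      rw [U, U, show (x &&& 63).testBit b = x.testBit b from by simp [Nat.testBit_and, tb63, hb]]
  | negSucc m =>
      rw [pvLow_negSucc,
          show Int.negSucc m >>> b = Int.negSucc (m >>> b) from rfl,
          show (1 : Int) = ((1 : Nat) : Int) from rfl, bandNegNat]
      unfold pvBit
      rw [T _ (by have : 63 &&& m ≤ 63 := Nat.and_le_left; omega), U]
      rw [show ((63 &&& m) ^^^ 63).testBit b = !(m.testBit b) from by
        simp [Nat.testBit_and, Nat.testBit_xor, tb63, hb]]
      rw [show (1 : Nat) &&& (m >>> b) = if m.testBit b then 1 else 0 from by rw [Nat.and_comm]; exact U m b]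
      cases hm : m.testBit b <;> simp

set_option maxHeartbeats 2000000 in
theorem K1 : ∀ v < 64, ∀ r < 64,
    pvG v r = pvT v 0 r + pvT v 1 r + pvT v 2 r + pvT v 3 r + pvT v 4 r + pvT v 5 r := by decide

theorem sum_map_neg_int {α : Type} (xs : List α) (f : α → Int) :
    (xs.map (fun x => -f x)).sum = -(xs.map f).sum := by
  induction xs with
  | nil => simp
  | cons x l ih => simp [ih]; ring

theorem Tsum (points : List Int) (v b : Nat) :
    (points.map (fun p => pvT v b (pvLow p))).sum =
      if v.testBit b then (points.length : Int) - pvC points b else pvC points b := by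
  cases hb : v.testBit b
  · simp only [pvT, hb, Bool.false_eq_true, if_false]
    rfl
  · simp only [pvT, hb, if_true]
    have h : (points.map (fun p => 1 - pvBit (pvLow p) b))
        = (points.map (fun p => (1 : Int) + -(pvBit (pvLow p) b))) :=
      List.map_congr_left (fun p _ => by ring)
    rw [h, PySem.List.sum_map_add_int, PySem.List.sum_map_const_int,
        sum_map_neg_int points (fun p => pvBit (pvLow p) b)]
    simp only [pvC]
    ring

theorem costEq (points : List Int) (v : Nat) (hv : v < 64) :
    pvCost points v = pvScore points v := by
  unfold pvCost
  rw [PySem.List.foldl_add points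
    (fun p => (PySem.Int.bitCount (PySem.Int.band (PySem.Int.bxor p (v : Int)) 63) : Int)) 0]
  have h1 : (points.map (fun p => (PySem.Int.bitCount (PySem.Int.band (PySem.Int.bxor p (v : Int)) 63) : Int))).sum
      = (points.map (fun p => pvG v (pvLow p))).sum := by
    congr 1
    exact List.map_congr_left (fun p _ => by rw [ML1]; rfl)
  have h2 : (points.map (fun p => pvG v (pvLow p))).sum
      = (points.map (fun p => pvT v 0 (pvLow p) + pvT v 1 (pvLow p) + pvT v 2 (pvLow p)
          + pvT v 3 (pvLow p) + pvT v 4 (pvLow p) + pvT v 5 (pvLow p))).sum := by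
    congr 1
    exact List.map_congr_left (fun p _ => K1 v hv (pvLow p) (pvLow_lt p))
  rw [h1, h2]
  rw [PySem.List.sum_map_add_int, PySem.List.sum_map_add_int, PySem.List.sum_map_add_int,
      PySem.List.sum_map_add_int, PySem.List.sum_map_add_int]
  rw [Tsum, Tsum, Tsum, Tsum, Tsum, Tsum]
  unfold pvScore; ring

theorem band_one_cases (x : Int) : PySem.Int.band x 1 = 0 ∨ PySem.Int.band x 1 = 1 := by
  unfold PySem.Int.band
  cases x with
  | ofNat n => simp; omega
  | negSucc n => simp; omega

theorem count_eq_sum (points : List Int) (b : Nat) (a : Int) :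
    points.foldl (fun (acc : Int) (p : Int) => if PySem.Int.band (p >>> b) 1 ≠ 0 then acc + 1 else acc) a
    = points.foldl (fun (acc : Int) (p : Int) => acc + PySem.Int.band (p >>> b) 1) a := by
  induction points generalizing a with
  | nil => rfl
  | cons p ps ih =>
      simp only [List.foldl_cons]
      rcases band_one_cases (p >>> b) with h | h
      · rw [h, if_neg (by norm_num), add_zero]; exact ih a
      · rw [h, if_pos (by norm_num)]; exact ih (a + 1)

theorem countC (points : List Int) (b : Nat) (hb : b < 6) :
    points.foldl (fun (acc : Int) (p : Int) => if PySem.Int.band (p >>> b) 1 ≠ 0 then acc + 1 else acc) 0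
    = pvC points b := by
  rw [count_eq_sum, PySem.List.foldl_add points (fun p => PySem.Int.band (p >>> b) 1) 0, zero_add]
  unfold pvC
  congr 1
  exact List.map_congr_left (fun p _ => ML2 p b hb)

theorem Aeq (points : List Int) : centroid_hex points = ((pvW points : Nat) : Int) := by
  have hiff : ∀ b, (PySem.Int.floordiv (points.length : Int) 2 < pvC points b) ↔ pvD points b = true := by
    intro b
    rw [PySem.Int.floordiv_lt_iff_lt_mul (by norm_num)]
    simp [pvD]
  unfold centroid_hex
  simp only [show List.range 6 = [0, 1, 2, 3, 4, 5] from rfl, List.foldl_cons, List.foldl_nil,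
    countC points 0 (by norm_num), countC points 1 (by norm_num), countC points 2 (by norm_num),
    countC points 3 (by norm_num), countC points 4 (by norm_num), countC points 5 (by norm_num),
    gt_iff_lt]
  simp only [hiff]
  unfold pvW
  by_cases h0 : pvD points 0 <;> by_cases h1 : pvD points 1 <;> by_cases h2 : pvD points 2 <;>
    by_cases h3 : pvD points 3 <;> by_cases h4 : pvD points 4 <;> by_cases h5 : pvD points 5 <;>
    simp [h0, h1, h2, h3, h4, h5] <;> decide

theorem WP : ∀ a b c d e f : Bool,
    ((if a then 1 else 0) + (if b then 2 else 0) + (if c then 4 else 0) +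
     (if d then 8 else 0) + (if e then 16 else 0) + (if f then 32 else 0) : Nat) < 64 ∧
    (((if a then 1 else 0) + (if b then 2 else 0) + (if c then 4 else 0) +
     (if d then 8 else 0) + (if e then 16 else 0) + (if f then 32 else 0) : Nat).testBit 0 = a) ∧
    (((if a then 1 else 0) + (if b then 2 else 0) + (if c then 4 else 0) +
     (if d then 8 else 0) + (if e then 16 else 0) + (if f then 32 else 0) : Nat).testBit 1 = b) ∧
    (((if a then 1 else 0) + (if b then 2 else 0) + (if c then 4 else 0) +
     (if d then 8 else 0) + (if e then 16 else 0) + (if f then 32 else 0) : Nat).testBit 2 = c) ∧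
    (((if a then 1 else 0) + (if b then 2 else 0) + (if c then 4 else 0) +
     (if d then 8 else 0) + (if e then 16 else 0) + (if f then 32 else 0) : Nat).testBit 3 = d) ∧
    (((if a then 1 else 0) + (if b then 2 else 0) + (if c then 4 else 0) +
     (if d then 8 else 0) + (if e then 16 else 0) + (if f then 32 else 0) : Nat).testBit 4 = e) ∧
    (((if a then 1 else 0) + (if b then 2 else 0) + (if c then 4 else 0) +
     (if d then 8 else 0) + (if e then 16 else 0) + (if f then 32 else 0) : Nat).testBit 5 = f) := by decide

theorem SUBSET : ∀ w < 64, ∀ v < 64,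
    (∀ b < 6, w.testBit b = true → v.testBit b = true) → w ≤ v := by decide

theorem argmin_fold (f : Nat → Int) : ∀ n : Nat, 0 < n →
    ∃ j, j < n ∧
      (List.range n).foldl (fun (st : Int × Option Int) (v : Nat) =>
        match st.2 with
        | none => ((v : Int), some (f v))
        | some bc => if f v < bc then ((v : Int), some (f v)) else st)
        ((0 : Int), (none : Option Int)) = ((j : Int), some (f j)) ∧
      (∀ v, v < n → f j ≤ f v) ∧ (∀ v, v < j → f j < f v) := by
  intro n
  induction n with
  | zero => omega
  | succ n ih =>
      intro _
      by_cases hn : 0 < n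
      · obtain ⟨j, hj, heq, hmin, hfirst⟩ := ih hn
        rw [List.range_succ, List.foldl_append, heq]
        by_cases hlt : f n < f j
        · refine ⟨n, by omega, by simp [hlt], ?_, ?_⟩
          · intro v hv
            by_cases h : v < n
            · exact le_of_lt (lt_of_lt_of_le hlt (hmin v h))
            · have : v = n := by omega
              simp [this]
          · intro v hv
            exact lt_of_lt_of_le hlt (hmin v hv)
        · refine ⟨j, by omega, by simp [hlt], ?_, hfirst⟩
          intro v hv
          by_cases h : v < n
          · exact hmin v h
          · have : v = n := by omega
            rw [this]; omega
      · have : n = 0 := by omega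
        subst this
        exact ⟨0, by omega, rfl, fun v hv => by interval_cases v; exact le_rfl, fun v hv => by omega⟩

theorem perbit (c k : Int) (x y : Bool) (hx : x = true ↔ k < c * 2) :
    (if x then k - c else c) ≤ (if y then k - c else c) := by
  cases x <;> cases y <;> simp_all <;> omega

theorem perbit_eq (c k : Int) (x y : Bool) (hx : x = true ↔ k < c * 2)
    (heq : (if x then k - c else c) = (if y then k - c else c))
    (hxt : x = true) : y = true := by
  cases y
  · rw [hxt] at heq
    simp at heq
    have := hx.mp hxt
    omega
  · rfl

theorem testBit_pvW (points : List Int) :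
    pvW points < 64 ∧ (pvW points).testBit 0 = pvD points 0 ∧ (pvW points).testBit 1 = pvD points 1 ∧
    (pvW points).testBit 2 = pvD points 2 ∧ (pvW points).testBit 3 = pvD points 3 ∧
    (pvW points).testBit 4 = pvD points 4 ∧ (pvW points).testBit 5 = pvD points 5 :=
  WP (pvD points 0) (pvD points 1) (pvD points 2) (pvD points 3) (pvD points 4) (pvD points 5)

theorem pvD_iff (points : List Int) (b : Nat) :
    pvD points b = true ↔ (points.length : Int) < pvC points b * 2 := by simp [pvD]

theorem score_min (points : List Int) (v : Nat) :
    pvScore points (pvW points) ≤ pvScore points v := by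
  obtain ⟨_, w0, w1, w2, w3, w4, w5⟩ := testBit_pvW points
  unfold pvScore
  rw [w0, w1, w2, w3, w4, w5]
  have h0 := perbit (pvC points 0) _ (pvD points 0) (v.testBit 0) (pvD_iff points 0)
  have h1 := perbit (pvC points 1) _ (pvD points 1) (v.testBit 1) (pvD_iff points 1)
  have h2 := perbit (pvC points 2) _ (pvD points 2) (v.testBit 2) (pvD_iff points 2)
  have h3 := perbit (pvC points 3) _ (pvD points 3) (v.testBit 3) (pvD_iff points 3)
  have h4 := perbit (pvC points 4) _ (pvD points 4) (v.testBit 4) (pvD_iff points 4)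
  have h5 := perbit (pvC points 5) _ (pvD points 5) (v.testBit 5) (pvD_iff points 5)
  exact add_le_add (add_le_add (add_le_add (add_le_add (add_le_add h0 h1) h2) h3) h4) h5

theorem score_first (points : List Int) (v : Nat) (hv : v < 64) (hlt : v < pvW points) :
    pvScore points (pvW points) < pvScore points v := by
  rcases lt_or_eq_of_le (score_min points v) with h | h
  · exact h
  · exfalso
    obtain ⟨hw64, w0, w1, w2, w3, w4, w5⟩ := testBit_pvW points
    have h0 := perbit (pvC points 0) _ (pvD points 0) (v.testBit 0) (pvD_iff points 0)
    have h1 := perbit (pvC points 1) _ (pvD points 1) (v.testBit 1) (pvD_iff points 1)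
    have h2 := perbit (pvC points 2) _ (pvD points 2) (v.testBit 2) (pvD_iff points 2)
    have h3 := perbit (pvC points 3) _ (pvD points 3) (v.testBit 3) (pvD_iff points 3)
    have h4 := perbit (pvC points 4) _ (pvD points 4) (v.testBit 4) (pvD_iff points 4)
    have h5 := perbit (pvC points 5) _ (pvD points 5) (v.testBit 5) (pvD_iff points 5)
    have hsum : pvScore points (pvW points) = pvScore points v := h
    unfold pvScore at hsum
    rw [w0, w1, w2, w3, w4, w5] at hsum
    have e0 : (if pvD points 0 then (points.length : Int) - pvC points 0 else pvC points 0) = (if v.testBit 0 then (points.length : Int) - pvC points 0 else pvC points 0) := by linarith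
    have e1 : (if pvD points 1 then (points.length : Int) - pvC points 1 else pvC points 1) = (if v.testBit 1 then (points.length : Int) - pvC points 1 else pvC points 1) := by linarith
    have e2 : (if pvD points 2 then (points.length : Int) - pvC points 2 else pvC points 2) = (if v.testBit 2 then (points.length : Int) - pvC points 2 else pvC points 2) := by linarith
    have e3 : (if pvD points 3 then (points.length : Int) - pvC points 3 else pvC points 3) = (if v.testBit 3 then (points.length : Int) - pvC points 3 else pvC points 3) := by linarith
    have e4 : (if pvD points 4 then (points.length : Int) - pvC points 4 else pvC points 4) = (if v.testBit 4 then (points.length : Int) - pvC points 4 else pvC points 4) := by linarith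
    have e5 : (if pvD points 5 then (points.length : Int) - pvC points 5 else pvC points 5) = (if v.testBit 5 then (points.length : Int) - pvC points 5 else pvC points 5) := by linarith
    have hsub : ∀ b < 6, (pvW points).testBit b = true → v.testBit b = true := by
      intro b hb
      interval_cases b
      · rw [w0]; exact fun hd => perbit_eq _ _ _ _ (pvD_iff points 0) e0 hd
      · rw [w1]; exact fun hd => perbit_eq _ _ _ _ (pvD_iff points 1) e1 hd
      · rw [w2]; exact fun hd => perbit_eq _ _ _ _ (pvD_iff points 2) e2 hd
      · rw [w3]; exact fun hd => perbit_eq _ _ _ _ (pvD_iff points 3) e3 hd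
      · rw [w4]; exact fun hd => perbit_eq _ _ _ _ (pvD_iff points 4) e4 hd
      · rw [w5]; exact fun hd => perbit_eq _ _ _ _ (pvD_iff points 5) e5 hd
    have := SUBSET (pvW points) hw64 v hv hsub
    omega

-- ===== VERDICT (by name: the statement is the Claim_ definition above) =====
theorem centroid_hex_spec : Claim_equal_centroid_hex := by
  intro points _ _
  unfold Spec_centroid_hex
  have hB : centroid_hex_alt points =
      ((List.range 64).foldl (fun (st : Int × Option Int) (v : Nat) =>
        match st.2 with
        | none => ((v : Int), some (pvCost points v))
        | some bc => if pvCost points v < bc then ((v : Int), some (pvCost points v)) else st)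
        ((0 : Int), (none : Option Int))).1 := rfl
  obtain ⟨j, hj64, heq, hmin, hfirst⟩ := argmin_fold (fun v => pvCost points v) 64 (by norm_num)
  obtain ⟨hw64, _⟩ := testBit_pvW points
  have hBj : centroid_hex_alt points = (j : Int) := by rw [hB, heq]
  have hfj : pvCost points j = pvScore points j := costEq points j hj64
  have hfw : pvCost points (pvW points) = pvScore points (pvW points) := costEq points (pvW points) hw64
  have hEq : j = pvW points := by
    rcases Nat.lt_trichotomy j (pvW points) with h | h | h
    · have hs := score_first points j hj64 h
      have hm := hmin (pvW points) hw64
      rw [hfj, hfw] at hm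
      omega
    · exact h
    · have hf := hfirst (pvW points) h
      have hs := score_min points j
      rw [hfj, hfw] at hf
      omega
  rw [Aeq, hBj, hEq]
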